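-- pv_equiv track=rewrite | github.com/bigdatagenomics/mango | mango-viz/bdgenomics/mango/pileup/utils.py | build_json_from_bed
-- ===== SOURCE A (Python) =====
-- def build_json_from_bed(first_start, first_end, first_chr, s_dict, e_dict, chr_dict):
--     """ dConverts a parsed bed file into a json string in GA4GH schema.
--
--     Args:
--         :param str: first start range
--         :param str: first end range
--         :param str: first reference chromosome
--         :param dict: start range values
--         :param dict: dictionary of
--
--     """
--     bed_content = "\"referenceName\":{}, \"start\":{}, \"end\":{}".format("\""+first_chr+"\"", "\""+str(first_start)+"\"", "\""+str(first_end)+"\"")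
--     json_ga4gh = "{\"features\":["
--     for i in range(len(chr_dict) + 1):
--         if i < len(chr_dict):
--             json_ga4gh = json_ga4gh + "{" + bed_content + "},"
--             bed_content = "\"referenceName\":{}, \"start\":{}, \"end\":{}".format("\""+chr_dict[str(i)]+"\"", "\""+str(s_dict[str(i)])+"\"", "\""+str(e_dict[str(i)])+"\"")
--         else:
--             json_ga4gh = json_ga4gh + "{" + bed_content + "}"
--
--
--     #ending json
--     json_ga4gh = json_ga4gh + "]}"
--     return json_ga4gh
-- ===== SOURCE B (Python) =====
-- def build_json_from_bed(first_start, first_end, first_chr, s_dict, e_dict, chr_dict):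
--     feats = [(first_chr, str(first_start), str(first_end))]
--     for i in range(len(chr_dict)):
--         k = str(i)
--         feats.append((chr_dict[k], str(s_dict[k]), str(e_dict[k])))
--     frags = ['{"referenceName":"' + c + '", "start":"' + s + '", "end":"' + e + '"}'
--              for (c, s, e) in feats]
--     return '{"features":[' + ','.join(frags) + ']}'
-- ===== Notes on version B (the rewrite author's own statement) =====
-- stated objective: simpler
-- what changed: Replaces A's lag-one loop (which formats each entry one iteration before emitting it and manages the trailing comma with an extra final iteration) by building the complete feature list first, formatting each feature independently, and joining the fragments with ','.join; separators become declarative instead of stateful.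
import Mathlib
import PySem

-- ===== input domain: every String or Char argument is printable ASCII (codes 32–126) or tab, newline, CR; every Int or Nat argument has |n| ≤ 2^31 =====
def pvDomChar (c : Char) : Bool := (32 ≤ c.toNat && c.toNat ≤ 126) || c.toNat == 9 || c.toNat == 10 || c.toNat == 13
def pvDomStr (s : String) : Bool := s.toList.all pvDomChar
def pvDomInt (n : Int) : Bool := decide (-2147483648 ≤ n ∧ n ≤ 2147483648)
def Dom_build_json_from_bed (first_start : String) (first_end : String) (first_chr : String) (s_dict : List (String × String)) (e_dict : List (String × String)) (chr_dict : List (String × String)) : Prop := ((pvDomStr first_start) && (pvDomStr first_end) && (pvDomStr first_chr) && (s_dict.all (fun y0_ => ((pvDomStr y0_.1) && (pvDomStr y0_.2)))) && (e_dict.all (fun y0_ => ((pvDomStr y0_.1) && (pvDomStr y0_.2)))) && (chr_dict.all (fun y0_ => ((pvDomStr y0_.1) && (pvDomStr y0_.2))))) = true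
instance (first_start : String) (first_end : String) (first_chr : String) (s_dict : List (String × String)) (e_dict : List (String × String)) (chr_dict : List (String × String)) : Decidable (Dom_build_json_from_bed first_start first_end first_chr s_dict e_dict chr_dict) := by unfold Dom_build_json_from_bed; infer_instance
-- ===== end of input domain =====

-- B replaces A's lag-one loop with stateful trailing-comma handling by "build the feature
-- list, format each, ','.join" (objective: simpler). Equivalence of return values is proved
-- on Pre_ (all required keys present; outside it both Pythons raise KeyError).

-- d[str(i)] : Python dict lookup (first match); default "" is never used inside Pre_.
def pvLookup (d : List (String × String)) (i : Nat) : String :=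
  PySem.Dict.getD (PySem.Dict.mk d) (PySem.Int.toStr (Int.ofNat i)) ""

-- ===== PORT A =====
-- bed_content format string of A (str() on a str is the identity)
def pvBedContentA (c s e : String) : String :=
  "\"referenceName\":" ++ ("\"" ++ c ++ "\"") ++ ", \"start\":" ++ ("\"" ++ s ++ "\"") ++ ", \"end\":" ++ ("\"" ++ e ++ "\"")

def build_json_from_bed (first_start : String) (first_end : String) (first_chr : String) (s_dict : List (String × String)) (e_dict : List (String × String)) (chr_dict : List (String × String)) : String :=
  let n := chr_dict.length
  let r := (List.range (n + 1)).foldl (fun (st : String × String) i =>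
      if i < n then
        (pvBedContentA (pvLookup chr_dict i) (pvLookup s_dict i) (pvLookup e_dict i),
         st.2 ++ "{" ++ st.1 ++ "},")
      else
        (st.1, st.2 ++ "{" ++ st.1 ++ "}"))
    (pvBedContentA first_chr first_start first_end, "{\"features\":[")
  r.2 ++ "]}"

-- ===== PORT B =====
def pvFragB (t : String × String × String) : String :=
  "{\"referenceName\":\"" ++ t.1 ++ "\", \"start\":\"" ++ t.2.1 ++ "\", \"end\":\"" ++ t.2.2 ++ "\"}"

def build_json_from_bed_alt (first_start : String) (first_end : String) (first_chr : String) (s_dict : List (String × String)) (e_dict : List (String × String)) (chr_dict : List (String × String)) : String :=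
  let feats := (first_chr, first_start, first_end) ::
    (List.range chr_dict.length).map (fun i => (pvLookup chr_dict i, pvLookup s_dict i, pvLookup e_dict i))
  let frags := feats.map pvFragB
  "{\"features\":[" ++ PySem.Str.join "," frags ++ "]}"

-- ===== PRECONDITION & SPEC =====
-- Pre_ excludes exactly the inputs where Python A raises KeyError: some key str(i),
-- i < len(chr_dict), missing from chr_dict, s_dict or e_dict (B raises there too).
def Pre_build_json_from_bed (first_start : String) (first_end : String) (first_chr : String) (s_dict : List (String × String)) (e_dict : List (String × String)) (chr_dict : List (String × String)) : Prop :=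
  ∀ i < chr_dict.length,
    PySem.Dict.contains (PySem.Dict.mk chr_dict) (PySem.Int.toStr (Int.ofNat i)) = true ∧
    PySem.Dict.contains (PySem.Dict.mk s_dict) (PySem.Int.toStr (Int.ofNat i)) = true ∧
    PySem.Dict.contains (PySem.Dict.mk e_dict) (PySem.Int.toStr (Int.ofNat i)) = true
instance (first_start : String) (first_end : String) (first_chr : String) (s_dict : List (String × String)) (e_dict : List (String × String)) (chr_dict : List (String × String)) : Decidable (Pre_build_json_from_bed first_start first_end first_chr s_dict e_dict chr_dict) := by unfold Pre_build_json_from_bed; infer_instance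

def pvWitness_build_json_from_bed : String × String × String × (List (String × String)) × (List (String × String)) × (List (String × String)) :=
  ("1", "100", "chrM", [("0", "10")], [("0", "20")], [("0", "chr1")])

def Spec_build_json_from_bed (first_start : String) (first_end : String) (first_chr : String) (s_dict : List (String × String)) (e_dict : List (String × String)) (chr_dict : List (String × String)) (out : String) : Prop := out = build_json_from_bed_alt first_start first_end first_chr s_dict e_dict chr_dict
instance (first_start : String) (first_end : String) (first_chr : String) (s_dict : List (String × String)) (e_dict : List (String × String)) (chr_dict : List (String × String)) (out : String) : Decidable (Spec_build_json_from_bed first_start first_end first_chr s_dict e_dict chr_dict out) := by unfold Spec_build_json_from_bed; infer_instance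

-- ===== CLAIM (what is proved, stated in full; the proofs are below) =====
def Claim_equal_build_json_from_bed : Prop := ∀ (first_start : String) (first_end : String) (first_chr : String) (s_dict : List (String × String)) (e_dict : List (String × String)) (chr_dict : List (String × String)), Dom_build_json_from_bed first_start first_end first_chr s_dict e_dict chr_dict → Pre_build_json_from_bed first_start first_end first_chr s_dict e_dict chr_dict → Spec_build_json_from_bed first_start first_end first_chr s_dict e_dict chr_dict (build_json_from_bed first_start first_end first_chr s_dict e_dict chr_dict)

-- ===== LEMMAS AND PROOFS =====

theorem pv_str_ext (s t : String) (h : s.toList = t.toList) : s = t := by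
  have := congrArg String.ofList h; simpa using this

-- the comma-terminated prefix A's json accumulator has gathered after n loop iterations,
-- where c 0 is the initial bed_content and c (i+1) the one computed at iteration i
def pvPre (c : Nat → String) : Nat → String
  | 0 => ""
  | n + 1 => pvPre c n ++ ("{" ++ c n ++ "},")

-- the same prefix, rebuilt from a list of already-brace-wrapped fragments
def pvPreL : List String → String
  | [] => ""
  | a :: t => (a ++ ",") ++ pvPreL t

theorem pvLoopA_inv (N : Nat) (c : Nat → String) (n : Nat) (hn : n ≤ N) (j : String) :
    (List.range n).foldl (fun (st : String × String) i =>
        if i < N then (c (i + 1), st.2 ++ "{" ++ st.1 ++ "},")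
        else (st.1, st.2 ++ "{" ++ st.1 ++ "}")) (c 0, j)
      = (c n, j ++ pvPre c n) := by
  induction n with
  | zero => simp [pvPre]
  | succ m ih =>
      rw [List.range_succ, List.foldl_append, ih (Nat.le_of_succ_le hn)]
      have hm : m < N := hn
      simp only [List.foldl_cons, List.foldl_nil, if_pos hm, pvPre]
      refine Prod.ext rfl ?_
      apply pv_str_ext; simp [String.toList_append]

theorem pvJoin_cons_cons (a b : String) (l : List String) :
    PySem.Str.join "," (a :: b :: l) = a ++ "," ++ PySem.Str.join "," (b :: l) := by
  simp only [PySem.Str.join, PySem.Chars.join, List.intercalate, List.map,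
    List.intersperse_cons₂, List.flatten_cons, String.ofList_append, String.ofList_toList]
  apply pv_str_ext; simp [String.toList_append]

theorem pvJoin_snoc (l : List String) (x : String) :
    PySem.Str.join "," (l ++ [x]) = pvPreL l ++ x := by
  induction l with
  | nil =>
      simp only [List.nil_append, pvPreL]
      apply pv_str_ext
      simp [PySem.Str.join, PySem.Chars.join, List.intercalate]
  | cons a t ih =>
      rcases ht : t ++ [x] with _ | ⟨b, r⟩
      · exact absurd ht (List.append_ne_nil_of_right_ne_nil t (by simp))
      · rw [List.cons_append, ht, pvJoin_cons_cons, ← ht, ih]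
        simp only [pvPreL]
        apply pv_str_ext; simp [String.toList_append]

theorem pvPreL_append (l₁ l₂ : List String) :
    pvPreL (l₁ ++ l₂) = pvPreL l₁ ++ pvPreL l₂ := by
  induction l₁ with
  | nil => simp [pvPreL]
  | cons a t ih =>
      simp only [List.cons_append, pvPreL, ih]
      apply pv_str_ext; simp [String.toList_append]

theorem pvPre_eq_pvPreL (c : Nat → String) (n : Nat) :
    pvPre c n = pvPreL ((List.range n).map (fun i => "{" ++ c i ++ "}")) := by
  induction n with
  | zero => simp [pvPre, pvPreL]
  | succ m ih =>
      rw [List.range_succ, List.map_append, pvPreL_append]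
      simp only [pvPre, ih, List.map_cons, List.map_nil, pvPreL]
      apply pv_str_ext; simp [String.toList_append]

theorem pvFragB_eq (a b e : String) :
    pvFragB (a, b, e) = "{" ++ pvBedContentA a b e ++ "}" := by
  apply pv_str_ext; simp [pvFragB, pvBedContentA, String.toList_append]

-- ===== VERDICT (by name: the statement is the Claim_ definition above) =====
theorem build_json_from_bed_spec : Claim_equal_build_json_from_bed := by
  intro fs fe fc sd ed cd _ _
  unfold Spec_build_json_from_bed build_json_from_bed build_json_from_bed_alt
  simp only []
  set N := cd.length with hN
  set c : Nat → String := fun i => match i with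
    | 0 => pvBedContentA fc fs fe
    | k + 1 => pvBedContentA (pvLookup cd k) (pvLookup sd k) (pvLookup ed k) with hc
  -- A side
  have hA : (List.range (N + 1)).foldl (fun (st : String × String) i =>
      if i < N then
        (pvBedContentA (pvLookup cd i) (pvLookup sd i) (pvLookup ed i),
         st.2 ++ "{" ++ st.1 ++ "},")
      else (st.1, st.2 ++ "{" ++ st.1 ++ "}"))
      (pvBedContentA fc fs fe, "{\"features\":[")
      = (c N, "{\"features\":[" ++ pvPre c N ++ "{" ++ c N ++ "}") := by
    have h0 : (pvBedContentA fc fs fe, ("{\"features\":[" : String)) = (c 0, "{\"features\":[") := rfl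
    rw [h0, List.range_succ, List.foldl_append,
      pvLoopA_inv N c N le_rfl]
    simp only [List.foldl_cons, List.foldl_nil, lt_irrefl]
    refine Prod.ext rfl ?_
    apply pv_str_ext; simp [String.toList_append]
  -- B side fragments
  have hfrags : ((fc, fs, fe) ::
        (List.range N).map (fun i => (pvLookup cd i, pvLookup sd i, pvLookup ed i))).map pvFragB
      = ((List.range N).map (fun i => "{" ++ c i ++ "}")) ++ ["{" ++ c N ++ "}"] := by
    rw [show (["{" ++ c N ++ "}"] : List String)
          = (List.map (fun i => "{" ++ c i ++ "}") [N]) from rfl,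
      ← List.map_append, ← List.range_succ, List.range_succ_eq_map,
      List.map_cons, List.map_cons, List.map_map, List.map_map]
    congr 1
    · exact pvFragB_eq fc fs fe
    · apply List.map_congr_left
      intro x _
      exact pvFragB_eq _ _ _
  rw [hA, hfrags, pvJoin_snoc, ← pvPre_eq_pvPreL]
  apply pv_str_ext; simp [String.toList_append]
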